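-- pv_equiv track=rewrite | github.com/SNACES/core | src/process/clustering/MUISI/standard/muisi.py | get_top_count
-- ===== SOURCE A (Python) =====
-- from collections import Counter
--
-- def get_top_count(filtered_item_to_info, top_count):
--     item_to_users = {}
--     for word in filtered_item_to_info:
--         final_item_info = {}
--         item_info = filtered_item_to_info[word]
--
--         # get only the top x users by word count
--         user_count = Counter({user: item_info[user][1] for user in item_info})
--         top_users = [user for user, count in user_count.most_common(top_count)]
--         for user in top_users:
--             final_item_info[user] = item_info[user]
--         item_to_users[word] = final_item_info
--
--     return item_to_users
-- ===== SOURCE B (Python) =====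
-- def get_top_count(filtered_item_to_info, top_count):
--     # Online top-k selection: one pass per word keeping a bounded ordered list of
--     # at most k candidates (descending by count, stable on ties); no Counter, no full sort.
--     k = top_count if top_count > 0 else 0
--     item_to_users = {}
--     for word, item_info in filtered_item_to_info.items():
--         best = []  # at most k (user, info) pairs, descending by info[1], ties first-seen first
--         for user, info in item_info.items():
--             i = 0
--             while i < len(best) and best[i][1][1] >= info[1]:
--                 i += 1
--             best.insert(i, (user, info))
--             if len(best) > k:
--                 best.pop()
--         item_to_users[word] = dict(best)
--     return item_to_users
-- ===== Notes on version B (the rewrite author's own statement) =====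
-- stated objective: alternative
-- what changed: B replaces the Counter-then-most_common selection (build a counter, rank all users, rebuild the dict from the ranked user list) by an online bounded top-k pass: per word it scans the users once, maintaining an insertion-ordered list of at most k best (user, info) pairs (descending by count, stable ties), so no counter and no full ranking of all users is ever materialised.
import Mathlib
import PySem

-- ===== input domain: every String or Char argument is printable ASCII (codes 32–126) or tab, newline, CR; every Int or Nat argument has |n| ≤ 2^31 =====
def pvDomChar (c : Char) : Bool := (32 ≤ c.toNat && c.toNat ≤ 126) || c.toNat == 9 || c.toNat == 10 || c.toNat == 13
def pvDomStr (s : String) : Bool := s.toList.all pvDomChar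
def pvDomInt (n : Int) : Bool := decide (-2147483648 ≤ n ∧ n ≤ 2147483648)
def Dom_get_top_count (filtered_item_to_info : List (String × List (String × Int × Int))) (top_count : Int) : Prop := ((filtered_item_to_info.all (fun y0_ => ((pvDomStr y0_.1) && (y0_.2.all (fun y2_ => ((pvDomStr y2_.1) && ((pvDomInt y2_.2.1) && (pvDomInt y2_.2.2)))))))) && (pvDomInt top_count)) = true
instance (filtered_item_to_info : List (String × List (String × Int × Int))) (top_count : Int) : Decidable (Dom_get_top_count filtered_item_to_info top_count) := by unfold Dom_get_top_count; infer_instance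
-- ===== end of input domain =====

-- B replaces Counter + most_common ranking by an online bounded top-k pass per word
-- (an insertion-ordered list of at most k best users); objective: alternative.

-- ===== PORT A =====
-- Both ports first realise the dict-of-dicts the Python receives (assoc lists with a
-- possibly duplicated key collapse exactly as a Python dict literal: last value wins,
-- first position kept), via PySem.Dict.ofList.
-- Counter({u: item_info[u][1] for u in item_info}) keeps dict order; most_common(n) is
-- the stable descending sort by count cut to n (empty for negative n).
def get_top_count (filtered_item_to_info : List (String × List (String × Int × Int))) (top_count : Int) : List (String × List (String × Int × Int)) :=
  let outer : PySem.Dict String (PySem.Dict String (Int × Int)) :=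
    PySem.Dict.ofList (filtered_item_to_info.map (fun p => (p.1, PySem.Dict.ofList p.2)))
  (outer.items.foldl (fun item_to_users p =>
      let item_info := p.2
      let user_count : List (String × Int) :=
        item_info.keys.map (fun u => (u, (item_info.getD u (0, 0)).2))
      let top_users : List String :=
        (if top_count < 0 then []
         else (PySem.List.sorted user_count (fun q => q.2) true).take top_count.toNat).map Prod.fst
      let final_item_info :=
        top_users.foldl (fun d u => d.insert u (item_info.getD u (0, 0))) PySem.Dict.empty
      item_to_users.insert p.1 final_item_info.items)
    (PySem.Dict.empty : PySem.Dict String (List (String × Int × Int)))).items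

-- ===== PORT B =====
-- the inner while/insert of Source B: place x after every kept pair with count ≥ x's count
def pvInsDesc (x : String × Int × Int) : List (String × Int × Int) → List (String × Int × Int)
  | [] => [x]
  | y :: ys => if y.2.2 < x.2.2 then x :: y :: ys else y :: pvInsDesc x ys

def get_top_count_alt (filtered_item_to_info : List (String × List (String × Int × Int))) (top_count : Int) : List (String × List (String × Int × Int)) :=
  let k : Int := if top_count > 0 then top_count else 0
  let outer : PySem.Dict String (PySem.Dict String (Int × Int)) :=
    PySem.Dict.ofList (filtered_item_to_info.map (fun p => (p.1, PySem.Dict.ofList p.2)))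
  (outer.items.foldl (fun item_to_users p =>
      let best : List (String × Int × Int) :=
        p.2.items.foldl (fun best kv =>
          let b' := pvInsDesc kv best
          if (b'.length : Int) > k then b'.dropLast else b') []
      item_to_users.insert p.1 (PySem.Dict.ofList best).items)
    (PySem.Dict.empty : PySem.Dict String (List (String × Int × Int)))).items

-- ===== PRECONDITION & SPEC =====
def Spec_get_top_count (filtered_item_to_info : List (String × List (String × Int × Int))) (top_count : Int) (out : List (String × List (String × Int × Int))) : Prop := out = get_top_count_alt filtered_item_to_info top_count
instance (filtered_item_to_info : List (String × List (String × Int × Int))) (top_count : Int) (out : List (String × List (String × Int × Int))) : Decidable (Spec_get_top_count filtered_item_to_info top_count out) := by unfold Spec_get_top_count; infer_instance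

-- ===== CLAIM (what is proved, stated in full; the proofs are below) =====
def Claim_equal_get_top_count : Prop := ∀ (filtered_item_to_info : List (String × List (String × Int × Int))) (top_count : Int), Dom_get_top_count filtered_item_to_info top_count → Spec_get_top_count filtered_item_to_info top_count (get_top_count filtered_item_to_info top_count)

-- ===== LEMMAS AND PROOFS =====

-- an assoc list with distinct keys round-trips through Dict.ofList
theorem pv_ofList_items_of_nodup {κ ν : Type} [BEq κ] [LawfulBEq κ]
    (ps : List (κ × ν)) (h : (ps.map Prod.fst).Nodup) :
    (PySem.Dict.ofList ps).items = ps := by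
  have := PySem.Dict.items_foldl_insert_fresh ps Prod.fst Prod.snd
    (PySem.Dict.empty (κ := κ) (ν := ν)) (by intro a _; simp [PySem.Dict.contains_empty]) h
  simpa [PySem.Dict.ofList, PySem.Dict.update, PySem.Dict.empty] using this

theorem pv_insertBy_map {α β : Type} (bef : α → α → Bool) (bef' : β → β → Bool) (g : β → α)
    (h : ∀ a b, bef (g a) (g b) = bef' a b) (x : β) (ys : List β) :
    PySem.List.insertBy bef (g x) (ys.map g) = (PySem.List.insertBy bef' x ys).map g := by
  induction ys with
  | nil => simp [PySem.List.insertBy]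
  | cons y ys ih =>
    simp only [List.map_cons, PySem.List.insertBy, h x y]
    split_ifs <;> simp [ih]

theorem pv_foldl_insertBy_map {α β : Type} (bef : α → α → Bool) (bef' : β → β → Bool) (g : β → α)
    (h : ∀ a b, bef (g a) (g b) = bef' a b) (xs : List β) (acc : List β) :
    List.foldl (fun acc x => PySem.List.insertBy bef x acc) (acc.map g) (xs.map g)
      = (List.foldl (fun acc x => PySem.List.insertBy bef' x acc) acc xs).map g := by
  induction xs generalizing acc with
  | nil => rfl
  | cons x xs ih =>
    simp only [List.map_cons, List.foldl_cons]
    rw [pv_insertBy_map bef bef' g h x acc, ih]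

-- sorting a mapped list with a key that factors through the map
theorem pv_sorted_map {α β κ : Type} [LinearOrder κ] (g : β → α) (key : α → κ) (rev : Bool)
    (xs : List β) :
    PySem.List.sorted (xs.map g) key rev = (PySem.List.sorted xs (fun b => key (g b)) rev).map g := by
  unfold PySem.List.sorted
  cases rev <;>
    simpa using pv_foldl_insertBy_map _ _ g (by intro a b; rfl) xs []

theorem pv_mem_values_foldl {κ ν : Type} [BEq κ] [LawfulBEq κ] (ps : List (κ × ν)) (d : PySem.Dict κ ν) (w : ν)
    (h : w ∈ (List.foldl (fun acc p => acc.insert p.1 p.2) d ps).values) :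
    w ∈ d.values ∨ ∃ p ∈ ps, w = p.2 := by
  induction ps generalizing d with
  | nil => exact Or.inl h
  | cons q qs ih =>
    rcases ih _ h with h' | ⟨p, hp, rfl⟩
    · rcases PySem.Dict.mem_values_insert (d := d) (k := q.1) (v := q.2) (w := w) h' with rfl | h''
      · exact Or.inr ⟨q, by simp⟩
      · exact Or.inl h''
    · exact Or.inr ⟨p, by simp [hp]⟩

-- Source B's insertion is PySem's insertBy for the reverse sort on the count key
theorem pv_insDesc_eq_insertBy (x : String × Int × Int) (l : List (String × Int × Int)) :
    pvInsDesc x l = PySem.List.insertBy (fun a b => decide (b.2.2 < a.2.2)) x l := by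
  induction l with
  | nil => rfl
  | cons y ys ih =>
    simp only [pvInsDesc, PySem.List.insertBy, ih, decide_eq_true_eq]

theorem pv_insDesc_length (x : String × Int × Int) (l : List (String × Int × Int)) :
    (pvInsDesc x l).length = l.length + 1 := by
  induction l with
  | nil => rfl
  | cons y ys ih =>
    simp only [pvInsDesc]
    split_ifs <;> simp [ih]

theorem pv_take_cons_take {α : Type} (m : Nat) (y : α) (t : List α) :
    List.take m (y :: List.take m t) = List.take m (y :: t) := by
  cases m with
  | zero => simp
  | succ n =>
    rw [List.take_succ_cons, List.take_succ_cons, List.take_take,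
      Nat.min_eq_left (Nat.le_succ n)]

-- inserting into a k-truncated list agrees with truncating after a full insert
theorem pv_insDesc_take (k : Nat) (s : List (String × Int × Int)) (x : String × Int × Int) :
    (pvInsDesc x (s.take k)).take k = (pvInsDesc x s).take k := by
  induction s generalizing k with
  | nil => simp
  | cons y t ih =>
    cases k with
    | zero => simp
    | succ m =>
      simp only [List.take_succ_cons, pvInsDesc]
      split_ifs with h
      · simp only [List.take_succ_cons, List.cons.injEq, true_and]
        exact pv_take_cons_take m y t
      · simp only [List.take_succ_cons, List.cons.injEq, true_and]
        exact ih m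

-- B's truncating fold computes the k-prefix of the untruncated insertion fold
theorem pv_trunc_foldl (k : Nat) (xs : List (String × Int × Int)) (s : List (String × Int × Int)) :
    xs.foldl (fun best kv =>
        let b' := pvInsDesc kv best
        if b'.length > k then b'.dropLast else b') (s.take k)
      = (xs.foldl (fun best kv => pvInsDesc kv best) s).take k := by
  induction xs generalizing s with
  | nil => simp
  | cons x xs ih =>
    simp only [List.foldl_cons]
    have hstep : (let b' := pvInsDesc x (s.take k)
        if b'.length > k then b'.dropLast else b') = ((pvInsDesc x s).take k).take k := by
      simp only [List.take_take, min_self]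
      rw [← pv_insDesc_take k s x]
      set b' := pvInsDesc x (s.take k) with hb
      have hlen : b'.length = (s.take k).length + 1 := pv_insDesc_length _ _
      have hle : (s.take k).length ≤ k := by simp
      split_ifs with h
      · have hk : b'.length = k + 1 := by omega
        rw [List.dropLast_eq_take, hk]
        simp
      · rw [List.take_of_length_le (by omega)]
    rw [hstep, List.take_take, min_self, ih]

-- the per-word bodies of the two ports agree on any inner dict with distinct keys
theorem pv_body_eq (info : PySem.Dict String (Int × Int)) (tc : Int) (hnd : info.keys.Nodup) :
    (((if tc < 0 then []
       else (PySem.List.sorted (info.keys.map (fun u => (u, (info.getD u (0, 0)).2)))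
              (fun q => q.2) true).take tc.toNat).map Prod.fst).foldl
        (fun d u => d.insert u (info.getD u (0, 0))) PySem.Dict.empty).items
      = (PySem.Dict.ofList
          ((PySem.List.sorted info.items (fun kv => kv.2.2) true).take (max tc 0).toNat)).items := by
  set g : (String × Int × Int) → String × Int := fun q => (q.1, q.2.2) with hg
  set s := PySem.List.sorted info.items (fun kv => kv.2.2) true with hs
  have h1 : info.keys.map (fun u => (u, (info.getD u (0, 0)).2)) = info.items.map g := by
    rw [PySem.Dict.items_eq_map_keys info hnd (0, 0), List.map_map]
    rfl
  have h2 : PySem.List.sorted (info.items.map g) (fun q => q.2) true = s.map g := by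
    rw [pv_sorted_map g (fun q : String × Int => q.2) true info.items]
  have h3 : (if tc < 0 then []
      else (PySem.List.sorted (info.keys.map (fun u => (u, (info.getD u (0, 0)).2)))
             (fun q => q.2) true).take tc.toNat) = (s.take (max tc 0).toNat).map g := by
    rw [h1, h2]
    split_ifs with hneg
    · have : (max tc 0).toNat = 0 := by omega
      simp [this]
    · have : (max tc 0).toNat = tc.toNat := by omega
      rw [this, List.map_take]
  rw [h3]
  set topk := s.take (max tc 0).toNat with htopk
  have hsub : topk.Sublist s := List.take_sublist _ _
  have hmem : ∀ q ∈ topk, q ∈ info.items := by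
    intro q hq
    exact (PySem.List.sorted_perm info.items (fun kv => kv.2.2) true).mem_iff.mp (hsub.mem hq)
  have hndk : (topk.map Prod.fst).Nodup := by
    have hps : (s.map Prod.fst).Perm (info.items.map Prod.fst) :=
      (PySem.List.sorted_perm info.items (fun kv => kv.2.2) true).map Prod.fst
    have : (s.map Prod.fst).Nodup := hps.nodup_iff.mpr hnd
    exact (hsub.map Prod.fst).nodup this
  have h4 : (topk.map g).map Prod.fst = topk.map Prod.fst := by
    rw [List.map_map]; rfl
  rw [h4]
  have h5 := PySem.Dict.items_foldl_insert_fresh (topk.map Prod.fst) (fun u => u)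
    (fun u => info.getD u (0, 0)) (PySem.Dict.empty (κ := String) (ν := Int × Int))
    (by intro a _; simp [PySem.Dict.contains_empty]) (by simpa using hndk)
  have h6 : (topk.map Prod.fst).foldl (fun d u => d.insert u (info.getD u (0, 0)))
      PySem.Dict.empty = (topk.map Prod.fst).foldl
        (fun d a => d.insert ((fun u => u) a) ((fun u => info.getD u (0, 0)) a))
        PySem.Dict.empty := rfl
  rw [h6, h5]
  rw [pv_ofList_items_of_nodup topk hndk, List.map_map]
  have h7 : ∀ q ∈ topk, ((fun a => ((fun u => u) a, (fun u => info.getD u (0, 0)) a)) ∘ Prod.fst) q = q := by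
    intro q hq
    have := PySem.Dict.getD_of_mem_items info (hmem q hq) hnd (0, 0)
    simp [Function.comp, this]
  simp only [PySem.Dict.empty]
  rw [List.map_congr_left h7]
  simp

-- B's bounded pass over one word computes exactly the k-prefix of the stable reverse sort
theorem pv_best_eq (info : PySem.Dict String (Int × Int)) (tc : Int) :
    info.items.foldl (fun best kv =>
        let b' := pvInsDesc kv best
        if (b'.length : Int) > (if tc > 0 then tc else 0) then b'.dropLast else b') []
      = (PySem.List.sorted info.items (fun kv => kv.2.2) true).take (max tc 0).toNat := by
  set k : Nat := (max tc 0).toNat with hk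
  have hcond : ∀ b' : List (String × Int × Int),
      ((b'.length : Int) > (if tc > 0 then tc else 0)) = (b'.length > k) := by
    intro b'
    simp only [hk, eq_iff_iff]
    split_ifs with h <;> constructor <;> intro hh <;> omega
  have hfold : info.items.foldl (fun best kv =>
        let b' := pvInsDesc kv best
        if (b'.length : Int) > (if tc > 0 then tc else 0) then b'.dropLast else b') []
      = info.items.foldl (fun best kv =>
        let b' := pvInsDesc kv best
        if b'.length > k then b'.dropLast else b') [] := by
    apply PySem.List.foldl_congr_mem
    intro a x _
    simp only [hcond]
  rw [hfold]
  have := pv_trunc_foldl k info.items []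
  simp only [List.take_nil] at this
  rw [this]
  congr 1
  rw [PySem.List.sorted_rev_eq_foldl_insertBy]
  apply PySem.List.foldl_congr_mem
  intro acc x _
  rw [pv_insDesc_eq_insertBy]

-- ===== VERDICT (by name: the statement is the Claim_ definition above) =====
theorem get_top_count_spec : Claim_equal_get_top_count := by
  intro fi tc _
  unfold Spec_get_top_count get_top_count get_top_count_alt
  set outer : PySem.Dict String (PySem.Dict String (Int × Int)) :=
    PySem.Dict.ofList (fi.map (fun p => (p.1, PySem.Dict.ofList p.2))) with houter
  have hndo : (outer.items.map Prod.fst).Nodup := PySem.Dict.nodup_keys_ofList _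
  have hval : ∀ p ∈ outer.items, p.2.keys.Nodup := by
    intro p hp
    have hv : p.2 ∈ outer.values := by
      simp only [PySem.Dict.values]
      exact List.mem_map.mpr ⟨p, hp, rfl⟩
    have := pv_mem_values_foldl (fi.map (fun p => (p.1, PySem.Dict.ofList p.2)))
      PySem.Dict.empty p.2 (by simpa [PySem.Dict.ofList, PySem.Dict.update] using hv)
    rcases this with h | ⟨q, hq, hq2⟩
    · simp [PySem.Dict.empty, PySem.Dict.values] at h
    · rcases List.mem_map.mp hq with ⟨r, _, rfl⟩
      rw [hq2]
      exact PySem.Dict.nodup_keys_ofList _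
  have hA := PySem.Dict.items_foldl_insert_fresh outer.items Prod.fst
    (fun p => (((if tc < 0 then []
       else (PySem.List.sorted (p.2.keys.map (fun u => (u, (p.2.getD u (0, 0)).2)))
              (fun q => q.2) true).take tc.toNat).map Prod.fst).foldl
        (fun d u => d.insert u (p.2.getD u (0, 0))) PySem.Dict.empty).items)
    (PySem.Dict.empty (κ := String) (ν := List (String × Int × Int)))
    (by intro a _; simp [PySem.Dict.contains_empty]) hndo
  have hB := PySem.Dict.items_foldl_insert_fresh outer.items Prod.fst
    (fun p => (PySem.Dict.ofList
        (p.2.items.foldl (fun best kv =>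
          let b' := pvInsDesc kv best
          if (b'.length : Int) > (if tc > 0 then tc else 0) then b'.dropLast else b') [])).items)
    (PySem.Dict.empty (κ := String) (ν := List (String × Int × Int)))
    (by intro a _; simp [PySem.Dict.contains_empty]) hndo
  simp only [houter] at *
  rw [hA, hB]
  apply congrArg (PySem.Dict.empty.items ++ ·)
  apply List.map_congr_left
  intro p hp
  refine congrArg (Prod.mk p.1) ?_
  rw [pv_body_eq p.2 tc (hval p hp), pv_best_eq p.2 tc]
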